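-- pv_equiv track=rewrite | github.com/brianfields/deeplearn | backend/src/modules/content_creation/service.py | _get_correct_answer_index
-- ===== SOURCE A (Python) =====
-- def _get_correct_answer_index(options: list[str], correct_answer: str) -> int:
--     """Get the zero-based index of the correct answer in the options list."""
--     try:
--         return options.index(correct_answer)
--     except ValueError:
--         # If exact match fails, try to find closest match
--         correct_answer_stripped = correct_answer.strip()
--         for i, option in enumerate(options):
--             if option.strip() == correct_answer_stripped:
--                 return i
--         # If no match found, return 0 as default
--         return 0
-- ===== SOURCE B (Python) =====
-- def _get_correct_answer_index(options: list[str], correct_answer: str) -> int: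
--     """Get the zero-based index of the correct answer in the options list."""
--     stripped_hit = None
--     target = correct_answer.strip()
--     for i, option in enumerate(options):
--         if option == correct_answer:
--             return i
--         if stripped_hit is None and option.strip() == target:
--             stripped_hit = i
--     return stripped_hit if stripped_hit is not None else 0
-- ===== Notes on version B (the rewrite author's own statement) =====
-- stated objective: simpler
-- what changed: One enumerate pass that returns immediately on an exact match and records the first stripped match in an auxiliary variable, replacing A's options.index call followed by a second stripped-comparison loop.
import Mathlib
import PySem

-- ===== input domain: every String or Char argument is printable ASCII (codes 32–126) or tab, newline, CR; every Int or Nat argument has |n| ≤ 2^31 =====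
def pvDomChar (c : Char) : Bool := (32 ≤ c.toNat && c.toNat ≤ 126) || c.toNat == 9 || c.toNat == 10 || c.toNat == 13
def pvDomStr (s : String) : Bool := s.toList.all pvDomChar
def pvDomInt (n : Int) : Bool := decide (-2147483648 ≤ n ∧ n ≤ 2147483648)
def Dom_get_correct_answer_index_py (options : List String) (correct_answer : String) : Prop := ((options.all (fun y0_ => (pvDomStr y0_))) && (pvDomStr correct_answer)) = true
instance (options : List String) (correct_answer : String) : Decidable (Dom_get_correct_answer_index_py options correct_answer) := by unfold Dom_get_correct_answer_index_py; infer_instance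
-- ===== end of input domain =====

-- B replaces A's options.index call plus second stripped-comparison loop by one
-- enumerate pass recording the first stripped match; objective: simpler (same cost).

-- ===== PORT A =====
-- the fallback 'for i, option in enumerate(options): if option.strip() == correct_answer_stripped: return i' / 'return 0'
def pyAStripLoop (options : List String) (cs : String) (i : Nat) : Int :=
  match options with
  | [] => 0
  | o :: rest => if PySem.Str.strip o = cs then (i : Int) else pyAStripLoop rest cs (i + 1)

def get_correct_answer_index_py (options : List String) (correct_answer : String) : Int :=
  match PySem.List.index? options correct_answer with    -- try: return options.index(correct_answer)
  | some i => (i : Int)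
  | none => pyAStripLoop options (PySem.Str.strip correct_answer) 0   -- except ValueError: fallback loop

-- ===== PORT B =====
-- single pass carrying stripped_hit (Option Int)
def altLoop (options : List String) (ca : String) (target : String) (i : Nat) (hit : Option Int) : Int :=
  match options with
  | [] => hit.getD 0
  | o :: rest =>
    if o = ca then (i : Int)
    else altLoop rest ca target (i + 1)
      (if hit.isNone && (PySem.Str.strip o = target) then some (i : Int) else hit)

def get_correct_answer_index_py_alt (options : List String) (correct_answer : String) : Int :=
  altLoop options correct_answer (PySem.Str.strip correct_answer) 0 none

-- ===== PRECONDITION & SPEC =====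
def Spec_get_correct_answer_index_py (options : List String) (correct_answer : String) (out : Int) : Prop := out = get_correct_answer_index_py_alt options correct_answer
instance (options : List String) (correct_answer : String) (out : Int) : Decidable (Spec_get_correct_answer_index_py options correct_answer out) := by unfold Spec_get_correct_answer_index_py; infer_instance

-- ===== CLAIM (what is proved, stated in full; the proofs are below) =====
def Claim_equal_get_correct_answer_index_py : Prop := ∀ (options : List String) (correct_answer : String), Dom_get_correct_answer_index_py options correct_answer → Spec_get_correct_answer_index_py options correct_answer (get_correct_answer_index_py options correct_answer)

-- ===== LEMMAS AND PROOFS =====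

-- once hit is set and no exact match remains, B returns hit
theorem altLoop_hit_some (options : List String) (ca target : String) (h : Int) :
    ∀ i : Nat, PySem.List.index? options ca = none →
      altLoop options ca target i (some h) = h := by
  induction options with
  | nil => intro i _; rfl
  | cons o rest ih =>
    intro i hidx
    have hne : o ≠ ca := by
      intro he; subst he
      simp at hidx
    rw [PySem.List.index?_cons_of_ne rest hne] at hidx
    have hrest : PySem.List.index? rest ca = none := by
      cases hh : PySem.List.index? rest ca with
      | none => rfl
      | some k => rw [hh] at hidx; simp at hidx
    simp only [altLoop, if_neg hne, Option.isNone_some, Bool.false_and, if_neg Bool.false_ne_true]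
    exact ih (i + 1) hrest

-- exact match at offset j ⇒ B returns i + j regardless of hit
theorem altLoop_exact (options : List String) (ca target : String) :
    ∀ (j i : Nat) (hit : Option Int), PySem.List.index? options ca = some j →
      altLoop options ca target i hit = (i : Int) + j := by
  induction options with
  | nil =>
    intro j i hit hidx
    simp [PySem.List.index?] at hidx
  | cons o rest ih =>
    intro j i hit hidx
    by_cases he : o = ca
    · subst he
      rw [PySem.List.index?_cons_self] at hidx
      cases hidx
      simp [altLoop]
    · rw [PySem.List.index?_cons_of_ne rest he] at hidx
      cases hh : PySem.List.index? rest ca with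
      | none => rw [hh] at hidx; simp at hidx
      | some k =>
        rw [hh] at hidx
        simp only [Option.map_some] at hidx
        cases hidx
        simp only [altLoop, if_neg he]
        rw [ih k (i + 1) _ hh]
        push_cast; ring

-- no exact match ⇒ hit = none pass equals A's stripped loop
theorem altLoop_no_exact (options : List String) (ca target : String) :
    ∀ i : Nat, PySem.List.index? options ca = none →
      altLoop options ca target i none = pyAStripLoop options target i := by
  induction options with
  | nil => intro i _; rfl
  | cons o rest ih =>
    intro i hidx
    have hne : o ≠ ca := by
      intro he; subst he
      simp at hidx
    rw [PySem.List.index?_cons_of_ne rest hne] at hidx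
    have hrest : PySem.List.index? rest ca = none := by
      cases hh : PySem.List.index? rest ca with
      | none => rfl
      | some k => rw [hh] at hidx; simp at hidx
    simp only [altLoop, pyAStripLoop, if_neg hne]
    by_cases hs : PySem.Str.strip o = target
    · simp only [hs, Option.isNone_none, Bool.true_and, decide_true, if_pos rfl]
      exact altLoop_hit_some rest ca target (i : Int) (i + 1) hrest
    · simp only [Option.isNone_none, Bool.true_and, decide_eq_true_eq, if_neg hs]
      exact ih (i + 1) hrest

-- ===== VERDICT (by name: the statement is the Claim_ definition above) =====
theorem get_correct_answer_index_py_spec : Claim_equal_get_correct_answer_index_py := by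
  intro options correct_answer _
  unfold Spec_get_correct_answer_index_py get_correct_answer_index_py get_correct_answer_index_py_alt
  cases hidx : PySem.List.index? options correct_answer with
  | none => exact (altLoop_no_exact options correct_answer _ 0 hidx).symm
  | some j =>
    rw [altLoop_exact options correct_answer _ j 0 none hidx]
    simp
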